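-- pv_equiv track=rewrite | github.com/Ro4Git/adventofcode | 2021/day22.py | splitCubeOnAxis
-- ===== SOURCE A (Python) =====
-- import re, time, copy, sys, math, pygame
--
-- def splitCubeOnAxis(cube1,cube2,axis):
--     for i in range(3):
--         if cube1[i][1]<cube2[i][0] or cube2[i][1] < cube1[i][0]:
--             return [cube2]
--     if cube2[axis][0]<cube1[axis][0]:
--         if cube2[axis][1]<=cube1[axis][1]:
--             #  [     +------+     ]
--             #  [+------+          ]
--             ncube1 = copy.deepcopy(cube2)
--             ncube2 = copy.deepcopy(cube2)
--             ncube1[axis][1] = cube1[axis][0]-1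
--             ncube2[axis][0] = cube1[axis][0]
--             return [ncube1,ncube2]
--         else:
--             #  [     +------+        ]
--             #  [  +------------+     ]
--             ncube1 = copy.deepcopy(cube2)
--             ncube2 = copy.deepcopy(cube2)
--             ncube3 = copy.deepcopy(cube2)
--             ncube1[axis][1] = cube1[axis][0]-1
--             ncube2[axis][0] = cube1[axis][0]
--             ncube2[axis][1] = cube1[axis][1]
--             ncube3[axis][0] = cube1[axis][1]+1
--             return [ncube1,ncube2,ncube3]
--     else:
--         if cube2[axis][1]>cube1[axis][1]:
--             #  [     +----------+      ]
--             #  [        +-----------+  ]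
--             ncube1 = copy.deepcopy(cube2)
--             ncube2 = copy.deepcopy(cube2)
--             ncube1[axis][1] = cube1[axis][1]
--             ncube2[axis][0] = cube1[axis][1]+1
--             return [ncube1,ncube2]
--         else:
--             #  [     +----------+    ]
--             #  [        +----+       ]
--             return [cube2]
-- ===== SOURCE B (Python) =====
-- import copy
--
-- def splitCubeOnAxis(cube1, cube2, axis):
--     if any(cube1[i][1] < cube2[i][0] or cube2[i][1] < cube1[i][0] for i in range(3)):
--         return [cube2]
--     lo1, hi1 = cube1[axis][0], cube1[axis][1]
--     lo2, hi2 = cube2[axis][0], cube2[axis][1]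
--     cuts = [lo2]
--     if lo2 < lo1 <= hi2:
--         cuts.append(lo1)
--     if lo2 < hi1 + 1 <= hi2:
--         cuts.append(hi1 + 1)
--     if len(cuts) == 1:
--         return [cube2]
--     ends = cuts[1:] + [hi2 + 1]
--     out = []
--     for s, e in zip(cuts, ends):
--         piece = copy.deepcopy(cube2)
--         piece[axis][0] = s
--         piece[axis][1] = e - 1
--         out.append(piece)
--     return out
-- ===== Notes on version B (the rewrite author's own statement) =====
-- stated objective: alternative
-- what changed: Replaces A's hard-coded four-way case analysis (each case building its pieces by hand) with a single generic pass: compute the list of cut points on the axis, pair each with the next cut, and map one segment-builder over the pairs.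
import Mathlib
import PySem

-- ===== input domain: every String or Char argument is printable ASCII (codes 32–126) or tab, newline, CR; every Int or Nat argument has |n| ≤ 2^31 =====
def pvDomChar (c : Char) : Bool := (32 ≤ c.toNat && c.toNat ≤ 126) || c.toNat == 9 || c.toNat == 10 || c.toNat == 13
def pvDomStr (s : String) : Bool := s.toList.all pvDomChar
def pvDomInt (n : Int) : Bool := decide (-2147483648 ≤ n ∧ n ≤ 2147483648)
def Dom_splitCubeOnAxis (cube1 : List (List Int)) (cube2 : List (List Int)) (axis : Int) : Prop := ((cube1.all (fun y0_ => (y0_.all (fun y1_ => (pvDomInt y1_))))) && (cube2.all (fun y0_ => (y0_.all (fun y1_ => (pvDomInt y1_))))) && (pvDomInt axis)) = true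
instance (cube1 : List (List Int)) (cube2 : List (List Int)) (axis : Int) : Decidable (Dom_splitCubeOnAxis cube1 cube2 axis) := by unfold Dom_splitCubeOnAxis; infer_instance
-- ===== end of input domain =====

-- B replaces A's four-way case analysis with a computed list of cut points paired into
-- segments (alternative decomposition, same cost); return values are proved equal on Pre_.

-- shared indexing sugar: cube[i][j] and "cube[i][j] = v" (in-range on Pre_)
def pvGet2 (c : List (List Int)) (i j : Nat) : Int := (c.getD i []).getD j 0
def pvSet2 (c : List (List Int)) (i j : Nat) (v : Int) : List (List Int) :=
  c.set i ((c.getD i []).set j v)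
-- Python negative-index resolution for cube[axis] (wraps by the list's length)
def pvAx (n : Nat) (axis : Int) : Nat := (if axis < 0 then axis + n else axis).toNat
-- the 3-axis disjointness guard, identical in both Pythons (for i in range(3): …)
def pvDisjoint (c1 c2 : List (List Int)) : Bool :=
  (List.range 3).any (fun i =>
    decide (pvGet2 c1 i 1 < pvGet2 c2 i 0) || decide (pvGet2 c2 i 1 < pvGet2 c1 i 0))

-- ===== PORT A =====
def splitCubeOnAxis (cube1 : List (List Int)) (cube2 : List (List Int)) (axis : Int) : List (List (List Int)) :=
  if pvDisjoint cube1 cube2 then [cube2]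
  else
    let ax1 := pvAx cube1.length axis
    let ax2 := pvAx cube2.length axis
    if pvGet2 cube2 ax2 0 < pvGet2 cube1 ax1 0 then
      if pvGet2 cube2 ax2 1 ≤ pvGet2 cube1 ax1 1 then
        let ncube1 := pvSet2 cube2 ax2 1 (pvGet2 cube1 ax1 0 - 1)
        let ncube2 := pvSet2 cube2 ax2 0 (pvGet2 cube1 ax1 0)
        [ncube1, ncube2]
      else
        let ncube1 := pvSet2 cube2 ax2 1 (pvGet2 cube1 ax1 0 - 1)
        let ncube2 := pvSet2 (pvSet2 cube2 ax2 0 (pvGet2 cube1 ax1 0)) ax2 1 (pvGet2 cube1 ax1 1)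
        let ncube3 := pvSet2 cube2 ax2 0 (pvGet2 cube1 ax1 1 + 1)
        [ncube1, ncube2, ncube3]
    else
      if pvGet2 cube1 ax1 1 < pvGet2 cube2 ax2 1 then
        let ncube1 := pvSet2 cube2 ax2 1 (pvGet2 cube1 ax1 1)
        let ncube2 := pvSet2 cube2 ax2 0 (pvGet2 cube1 ax1 1 + 1)
        [ncube1, ncube2]
      else [cube2]

-- ===== PORT B =====
def splitCubeOnAxis_alt (cube1 : List (List Int)) (cube2 : List (List Int)) (axis : Int) : List (List (List Int)) :=
  if pvDisjoint cube1 cube2 then [cube2]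
  else
    let ax1 := pvAx cube1.length axis
    let ax2 := pvAx cube2.length axis
    let lo1 := pvGet2 cube1 ax1 0
    let hi1 := pvGet2 cube1 ax1 1
    let lo2 := pvGet2 cube2 ax2 0
    let hi2 := pvGet2 cube2 ax2 1
    let cuts := [lo2]
      ++ (if lo2 < lo1 ∧ lo1 ≤ hi2 then [lo1] else [])
      ++ (if lo2 < hi1 + 1 ∧ hi1 + 1 ≤ hi2 then [hi1 + 1] else [])
    if cuts.length = 1 then [cube2]
    else
      (cuts.zip (cuts.drop 1 ++ [hi2 + 1])).map
        (fun p => pvSet2 (pvSet2 cube2 ax2 0 p.1) ax2 1 (p.2 - 1))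

-- ===== PRECONDITION & SPEC =====
-- Pre_ is the natural domain of a 3-axis splitter: at least three rows, rows 0..2 with
-- both bounds, and the axis resolving (after Python's negative-index wraparound) to one
-- of the three guarded rows 0..2 — or the guard detects disjoint cubes (evaluating rows
-- in order with Python's short-circuit), where axis and the remaining rows are never touched.
-- It excludes axis values that resolve to an unguarded row (axis ≥ 3, or a negative
-- axis on cubes of unequal or extra length), where A's value is an artefact of the
-- overlap guard only checking rows 0..2; A raises on the other excluded shapes.
def Pre_splitCubeOnAxis (cube1 : List (List Int)) (cube2 : List (List Int)) (axis : Int) : Prop :=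
  (3 ≤ cube1.length ∧ 3 ≤ cube2.length ∧
   (∀ i ∈ ([0, 1, 2] : List Nat), 2 ≤ (cube1.getD i []).length ∧ 2 ≤ (cube2.getD i []).length) ∧
   ((0 ≤ axis ∧ axis < 3) ∨
    (axis < 0 ∧ cube1.length = cube2.length ∧ 0 ≤ axis + cube1.length ∧ axis + cube1.length < 3))) ∨
  (∃ i ∈ ([0, 1, 2] : List Nat),
    (∀ j < i, 2 ≤ (cube1.getD j []).length ∧ 2 ≤ (cube2.getD j []).length ∧
       ¬ ((cube1.getD j []).getD 1 0 < (cube2.getD j []).getD 0 0 ∨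
          (cube2.getD j []).getD 1 0 < (cube1.getD j []).getD 0 0)) ∧
    ((2 ≤ (cube1.getD i []).length ∧ 1 ≤ (cube2.getD i []).length ∧
        (cube1.getD i []).getD 1 0 < (cube2.getD i []).getD 0 0) ∨
     (2 ≤ (cube1.getD i []).length ∧ 2 ≤ (cube2.getD i []).length ∧
        (cube2.getD i []).getD 1 0 < (cube1.getD i []).getD 0 0)))
instance (cube1 : List (List Int)) (cube2 : List (List Int)) (axis : Int) : Decidable (Pre_splitCubeOnAxis cube1 cube2 axis) := by unfold Pre_splitCubeOnAxis; infer_instance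

def pvWitness_splitCubeOnAxis : List (List Int) × List (List Int) × Int :=
  ([[0, 5], [0, 5], [0, 5]], [[2, 9], [2, 9], [2, 9]], 0)

def Spec_splitCubeOnAxis (cube1 : List (List Int)) (cube2 : List (List Int)) (axis : Int) (out : List (List (List Int))) : Prop := out = splitCubeOnAxis_alt cube1 cube2 axis
instance (cube1 : List (List Int)) (cube2 : List (List Int)) (axis : Int) (out : List (List (List Int))) : Decidable (Spec_splitCubeOnAxis cube1 cube2 axis out) := by unfold Spec_splitCubeOnAxis; infer_instance

-- ===== CLAIM (what is proved, stated in full; the proofs are below) =====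
def Claim_equal_splitCubeOnAxis : Prop := ∀ (cube1 : List (List Int)) (cube2 : List (List Int)) (axis : Int), Dom_splitCubeOnAxis cube1 cube2 axis → Pre_splitCubeOnAxis cube1 cube2 axis → Spec_splitCubeOnAxis cube1 cube2 axis (splitCubeOnAxis cube1 cube2 axis)

-- ===== LEMMAS AND PROOFS =====

-- setting cube[i][j] to its current value is the identity (in range)
theorem pvSet2_self (c : List (List Int)) (i j : Nat) (hj : j < (c.getD i []).length) :
    pvSet2 c i j (pvGet2 c i j) = c := by
  unfold pvSet2 pvGet2
  rw [List.getD_eq_getElem _ _ hj, List.set_getElem_self]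
  by_cases hi : i < c.length
  · rw [List.getD_eq_getElem _ _ hi, List.set_getElem_self]
  · rw [List.set_eq_of_length_le (by omega)]

-- the row read back after pvSet2 is the updated row (in range)
theorem pvGetD_pvSet2 (c : List (List Int)) (i j : Nat) (v : Int) (hi : i < c.length) :
    (pvSet2 c i j v).getD i [] = (c.getD i []).set j v := by
  unfold pvSet2
  rw [List.getD_eq_getElem _ _ (by simpa using hi), List.getElem_set_self]

-- B's double update collapses: the second write of an unchanged coordinate is a no-op
theorem pvSet2_fst_self (c : List (List Int)) (i : Nat) (v : Int)
    (hr : 2 ≤ (c.getD i []).length) :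
    pvSet2 (pvSet2 c i 0 (pvGet2 c i 0)) i 1 v = pvSet2 c i 1 v := by
  rw [pvSet2_self c i 0 (by omega)]

theorem pvSet2_snd_self (c : List (List Int)) (i : Nat) (s : Int)
    (hi : i < c.length) (hr : 2 ≤ (c.getD i []).length) :
    pvSet2 (pvSet2 c i 0 s) i 1 (pvGet2 c i 1) = pvSet2 c i 0 s := by
  have h1 : pvGet2 (pvSet2 c i 0 s) i 1 = pvGet2 c i 1 := by
    unfold pvGet2
    rw [pvGetD_pvSet2 c i 0 s hi]
    simp [List.getD_eq_getElem?_getD]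
  have h2 : (1 : Nat) < ((pvSet2 c i 0 s).getD i []).length := by
    rw [pvGetD_pvSet2 c i 0 s hi, List.length_set]; omega
  calc pvSet2 (pvSet2 c i 0 s) i 1 (pvGet2 c i 1)
      = pvSet2 (pvSet2 c i 0 s) i 1 (pvGet2 (pvSet2 c i 0 s) i 1) := by rw [h1]
    _ = pvSet2 c i 0 s := pvSet2_self _ i 1 h2

-- ===== VERDICT (by name: the statement is the Claim_ definition above) =====
theorem splitCubeOnAxis_spec : Claim_equal_splitCubeOnAxis := by
  intro cube1 cube2 axis _hdom hpre
  unfold Spec_splitCubeOnAxis splitCubeOnAxis splitCubeOnAxis_alt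
  rcases hpre with ⟨hl1, hl2, hrows, hax03⟩ | ⟨i, hi, _hfit, hdet⟩
  swap
  · -- the guard fires at row i: both programs return [cube2]
    have hd : pvDisjoint cube1 cube2 = true := by
      unfold pvDisjoint
      rw [List.any_eq_true]
      refine ⟨i, by rcases (by simpa using hi : i = 0 ∨ i = 1 ∨ i = 2) with h | h | h <;>
        simp [h], ?_⟩
      unfold pvGet2
      simp only [Bool.or_eq_true, decide_eq_true_eq]
      rcases hdet with ⟨_, _, h⟩ | ⟨_, _, h⟩
      · exact Or.inl (by simpa using h)
      · exact Or.inr (by simpa using h)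
    simp [hd]
  by_cases hd : pvDisjoint cube1 cube2
  · simp [hd]
  · simp only [hd, if_false, Bool.false_eq_true]
    set ax1 := pvAx cube1.length axis with hax1d
    set ax2 := pvAx cube2.length axis with hax2d
    have hax12 : ax2 = ax1 ∧ ax1 < 3 := by
      rw [hax1d, hax2d]
      unfold pvAx
      rcases hax03 with ⟨h0, h3⟩ | ⟨hn, hlen, hlo, hhi⟩
      · rw [if_neg (by omega), if_neg (by omega)]
        constructor
        · rfl
        · omega
      · rw [if_pos hn, if_pos hn, hlen]
        constructor
        · rfl
        · omega
    obtain ⟨hax2eq, haxlt⟩ := hax12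
    rw [hax2eq]
    set ax := ax1 with hax
    have hmem : ax ∈ ([0, 1, 2] : List Nat) := by
      rcases (by omega : ax = 0 ∨ ax = 1 ∨ ax = 2) with h | h | h <;> simp [h]
    have hr1 : 2 ≤ (cube1.getD ax []).length := (hrows ax hmem).1
    have hr2 : 2 ≤ (cube2.getD ax []).length := (hrows ax hmem).2
    have hi2 : ax < cube2.length := by omega
    -- the guard at axis ax did not fire
    have hguard : ¬ (pvGet2 cube1 ax 1 < pvGet2 cube2 ax 0 ∨
                     pvGet2 cube2 ax 1 < pvGet2 cube1 ax 0) := by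
      intro hcon
      apply hd
      unfold pvDisjoint
      rw [List.any_eq_true]
      exact ⟨ax, by simp [List.mem_range, haxlt], by
        rcases hcon with h | h <;> simp [h]⟩
    obtain ⟨hg1n, hg2n⟩ := not_or.mp hguard
    have hg1 : pvGet2 cube2 ax 0 ≤ pvGet2 cube1 ax 1 := by omega
    have hg2 : pvGet2 cube1 ax 0 ≤ pvGet2 cube2 ax 1 := by omega
    clear hg1n hg2n hguard
    set a0 := pvGet2 cube1 ax 0 with ha0
    set a1 := pvGet2 cube1 ax 1 with ha1
    set b0 := pvGet2 cube2 ax 0 with hb0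
    set b1 := pvGet2 cube2 ax 1 with hb1
    have e1 : ∀ v : Int, pvSet2 (pvSet2 cube2 ax 0 b0) ax 1 v = pvSet2 cube2 ax 1 v := by
      intro v; rw [hb0]; exact pvSet2_fst_self cube2 ax v hr2
    have e2 : ∀ u : Int, pvSet2 (pvSet2 cube2 ax 0 u) ax 1 b1 = pvSet2 cube2 ax 0 u := by
      intro u; rw [hb1]; exact pvSet2_snd_self cube2 ax u hi2 hr2
    clear_value ax a0 a1 b0 b1
    by_cases h1 : b0 < a0
    · by_cases h2 : b1 ≤ a1
      · -- A: two pieces [b0, a0-1], [a0, b1]; B: cuts [b0, a0]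
        rw [if_pos h1, if_pos h2,
            if_pos (⟨h1, hg2⟩ : b0 < a0 ∧ a0 ≤ b1),
            if_neg (by omega : ¬ (b0 < a1 + 1 ∧ a1 + 1 ≤ b1))]
        simp only [List.append_nil, List.cons_append, List.nil_append]
        rw [if_neg (by simp)]
        simp only [List.zip, List.drop, List.zipWith, List.map, List.cons_append,
          List.nil_append]
        rw [show b1 + 1 - 1 = b1 by ring, e1, e2]
      · -- A: three pieces; B: cuts [b0, a0, a1+1]
        rw [if_pos h1, if_neg h2,
            if_pos (⟨h1, hg2⟩ : b0 < a0 ∧ a0 ≤ b1),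
            if_pos (⟨by omega, by omega⟩ : b0 < a1 + 1 ∧ a1 + 1 ≤ b1)]
        simp only [List.cons_append, List.nil_append]
        rw [if_neg (by simp)]
        simp only [List.zip, List.drop, List.zipWith, List.map, List.cons_append,
          List.nil_append]
        rw [show a1 + 1 - 1 = a1 by ring, show b1 + 1 - 1 = b1 by ring, e1, e2]
    · by_cases h3 : a1 < b1
      · -- A: two pieces [b0, a1], [a1+1, b1]; B: cuts [b0, a1+1]
        rw [if_neg h1, if_pos h3,
            if_neg (by omega : ¬ (b0 < a0 ∧ a0 ≤ b1)),
            if_pos (⟨by omega, by omega⟩ : b0 < a1 + 1 ∧ a1 + 1 ≤ b1)]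
        simp only [List.append_nil, List.cons_append, List.nil_append]
        rw [if_neg (by simp)]
        simp only [List.zip, List.drop, List.zipWith, List.map, List.cons_append,
          List.nil_append]
        rw [show a1 + 1 - 1 = a1 by ring, show b1 + 1 - 1 = b1 by ring, e1, e2]
      · -- both return [cube2]
        rw [if_neg h1, if_neg h3,
            if_neg (by omega : ¬ (b0 < a0 ∧ a0 ≤ b1)),
            if_neg (by omega : ¬ (b0 < a1 + 1 ∧ a1 + 1 ≤ b1))]
        simp
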